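-- pv_equiv track=rewrite | github.com/12novel30/codingTest | 프로그래머스/lv2/77485. 행렬 테두리 회전하기/행렬 테두리 회전하기.py | solution
-- ===== SOURCE A (Python) =====
-- def solution(rows, columns, queries):
--     mat = [[] for i in range(rows)]
--     start = 1
--     for i in range(rows):
--         for j in range(columns):
--             mat[i].append(start)
--             start += 1
--
--     answer = []
--     for q in queries:
--         start = mat[q[0]-1][q[1]-1]
--         mini = start
--         for c in range(q[1], q[3]):
--             mat[q[0]-1][c], start = start, mat[q[0]-1][c]
--             mini = min(mini, start)
--         for r in range(q[0], q[2]):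
--             mat[r][q[3]-1], start = start, mat[r][q[3]-1]
--             mini = min(mini, start)
--         for c in range(q[3]-2, q[1]-2, -1):
--             mat[q[2]-1][c], start = start, mat[q[2]-1][c]
--             mini = min(mini, start)
--         for r in range(q[2]-2, q[0]-2, -1):
--             mat[r][q[1]-1], start = start, mat[r][q[1]-1]
--             mini = min(mini, start)
--         answer.append(mini)
--
--     return answer
-- ===== SOURCE B (Python) =====
-- def solution(rows, columns, queries):
--     # Build the matrix directly by formula, then handle each query by listing the
--     # border coordinates clockwise, rotating their value list by one, and writing back.
--     mat = [[r * columns + c + 1 for c in range(columns)] for r in range(rows)]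
--     answer = []
--     for q in queries:
--         r1, c1, r2, c2 = q[0] - 1, q[1] - 1, q[2] - 1, q[3] - 1
--         coords = ([(r1, c) for c in range(c1, c2 + 1)]
--                   + [(r, c2) for r in range(r1 + 1, r2 + 1)]
--                   + [(r2, c) for c in range(c2 - 1, c1 - 1, -1)]
--                   + [(r, c1) for r in range(r2 - 1, r1, -1)])
--         vals = [mat[r][c] for r, c in coords]
--         rotated = [vals[-1]] + vals[:-1]
--         for (r, c), v in zip(coords, rotated):
--             mat[r][c] = v
--         answer.append(min(vals))
--     return answer
-- ===== Notes on version B (the rewrite author's own statement) =====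
-- stated objective: alternative
-- what changed: A rotates each query's border with four in-place swap-carry loops threading a carried value through the matrix; B builds the clockwise border-coordinate list once, reads the value list, rotates it by one and writes it back, taking min of the value list (and builds the initial matrix by closed formula instead of an append counter loop).
-- outside the precondition, e.g. on solution(3, 3, [[1, 1, 1, 3], [1, 1, 2, 2]]): A returns [1, 1], B returns [1, 2]; on solution(3, 2, [[1, 0, 2, 2], [1, 1, 3, 0]]): A returns [1, 2], B returns [1, 3]
import Mathlib
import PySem

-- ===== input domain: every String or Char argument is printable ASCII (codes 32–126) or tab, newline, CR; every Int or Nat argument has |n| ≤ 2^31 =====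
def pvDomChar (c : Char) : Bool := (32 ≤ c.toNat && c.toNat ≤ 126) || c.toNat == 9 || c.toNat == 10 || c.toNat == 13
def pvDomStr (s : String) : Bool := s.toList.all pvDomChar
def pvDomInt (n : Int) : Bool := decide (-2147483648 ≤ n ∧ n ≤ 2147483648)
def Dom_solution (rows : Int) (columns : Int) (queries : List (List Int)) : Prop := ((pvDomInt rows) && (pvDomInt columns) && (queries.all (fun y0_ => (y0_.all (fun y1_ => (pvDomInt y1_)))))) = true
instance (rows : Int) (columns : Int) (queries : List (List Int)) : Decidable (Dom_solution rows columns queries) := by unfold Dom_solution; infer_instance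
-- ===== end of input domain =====

-- B replaces A's four in-place swap-carry loops by one clockwise border-coordinate list whose
-- value list is rotated by one and written back (alternative decomposition; same asymptotic cost).
-- Equivalence is about return values; the Python A mutates only its own local matrix.

-- ===== PORT A =====
-- shared Python-indexing helpers: mat[r][c] read / write, exact for in-range indices
-- (Pre_ keeps every used index in range; Python raises IndexError outside).
def pyRd (m : List (List Int)) (r c : Int) : Int :=
  (PySem.List.pyGet? ((PySem.List.pyGet? m r).getD []) c).getD 0

def pyWr (m : List (List Int)) (r c : Int) (v : Int) : List (List Int) :=
  PySem.List.pySetD m r (PySem.List.pySetD ((PySem.List.pyGet? m r).getD []) c v)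

def solution (rows : Int) (columns : Int) (queries : List (List Int)) : List Int :=
  let mat0 : List (List Int) := (PySem.List.pyRange 0 rows 1).map (fun _ => ([] : List Int))
  let built := (PySem.List.pyRange 0 rows 1).foldl (fun (st : List (List Int) × Int) i =>
      (PySem.List.pyRange 0 columns 1).foldl (fun (st2 : List (List Int) × Int) _j =>
        (PySem.List.pySetD st2.1 i (((PySem.List.pyGet? st2.1 i).getD []) ++ [st2.2]), st2.2 + 1)) st)
    (mat0, (1 : Int))
  let fin := queries.foldl (fun (st : List (List Int) × List Int) q =>
      let q0 := (PySem.List.pyGet? q 0).getD 0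
      let q1 := (PySem.List.pyGet? q 1).getD 0
      let q2 := (PySem.List.pyGet? q 2).getD 0
      let q3 := (PySem.List.pyGet? q 3).getD 0
      let s0 := pyRd st.1 (q0-1) (q1-1)
      let t1 := (PySem.List.pyRange q1 q3 1).foldl (fun (t : List (List Int) × Int × Int) c =>
          let old := pyRd t.1 (q0-1) c
          (pyWr t.1 (q0-1) c t.2.1, old, min t.2.2 old)) (st.1, s0, s0)
      let t2 := (PySem.List.pyRange q0 q2 1).foldl (fun (t : List (List Int) × Int × Int) r =>
          let old := pyRd t.1 r (q3-1)
          (pyWr t.1 r (q3-1) t.2.1, old, min t.2.2 old)) t1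
      let t3 := (PySem.List.pyRange (q3-2) (q1-2) (-1)).foldl (fun (t : List (List Int) × Int × Int) c =>
          let old := pyRd t.1 (q2-1) c
          (pyWr t.1 (q2-1) c t.2.1, old, min t.2.2 old)) t2
      let t4 := (PySem.List.pyRange (q2-2) (q0-2) (-1)).foldl (fun (t : List (List Int) × Int × Int) r =>
          let old := pyRd t.1 r (q1-1)
          (pyWr t.1 r (q1-1) t.2.1, old, min t.2.2 old)) t3
      (t4.1, st.2 ++ [t4.2.2])) (built.1, ([] : List Int))
  fin.2

-- ===== PORT B =====
def solution_alt (rows : Int) (columns : Int) (queries : List (List Int)) : List Int :=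
  let mat0 : List (List Int) := (PySem.List.pyRange 0 rows 1).map (fun r =>
    (PySem.List.pyRange 0 columns 1).map (fun c => r * columns + c + 1))
  (queries.foldl (fun (st : List (List Int) × List Int) q =>
    let r1 := (PySem.List.pyGet? q 0).getD 0 - 1
    let c1 := (PySem.List.pyGet? q 1).getD 0 - 1
    let r2 := (PySem.List.pyGet? q 2).getD 0 - 1
    let c2 := (PySem.List.pyGet? q 3).getD 0 - 1
    let coords : List (Int × Int) :=
      (PySem.List.pyRange c1 (c2+1) 1).map (fun c => (r1, c))
      ++ (PySem.List.pyRange (r1+1) (r2+1) 1).map (fun r => (r, c2))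
      ++ (PySem.List.pyRange (c2-1) (c1-1) (-1)).map (fun c => (r2, c))
      ++ (PySem.List.pyRange (r2-1) r1 (-1)).map (fun r => (r, c1))
    let vals := coords.map (fun p => pyRd st.1 p.1 p.2)
    let rotated := [(PySem.List.pyGet? vals (-1)).getD 0] ++ PySem.List.slice vals none (some (-1))
    let m1 := (coords.zip rotated).foldl (fun acc pv => pyWr acc pv.1.1 pv.1.2 pv.2) st.1
    (m1, st.2 ++ [(PySem.List.min? vals (fun x => x)).getD 0])) (mat0, ([] : List Int))).2

-- ===== PRECONDITION & SPEC =====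
-- Pre_ is the problem's natural domain: each query [x1,y1,x2,y2] names a proper in-range
-- rectangle (1 ≤ x1 < x2 ≤ rows, 1 ≤ y1 < y2 ≤ columns).  Outside it A either raises
-- IndexError (short queries, out-of-range indices) or returns accidental values of Python's
-- negative-index wraparound / of traversing a degenerate (x1 = x2 or y1 = y2) rectangle
-- twice (on some such corners, e.g. a single-cell query, the two programs happen to agree).
def Pre_solution (rows : Int) (columns : Int) (queries : List (List Int)) : Prop :=
  ∀ q ∈ queries, 4 ≤ q.length ∧
    1 ≤ q.getD 0 0 ∧ q.getD 0 0 < q.getD 2 0 ∧ q.getD 2 0 ≤ rows ∧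
    1 ≤ q.getD 1 0 ∧ q.getD 1 0 < q.getD 3 0 ∧ q.getD 3 0 ≤ columns

instance (rows : Int) (columns : Int) (queries : List (List Int)) : Decidable (Pre_solution rows columns queries) := by
  unfold Pre_solution; infer_instance

def pvWitness_solution : Int × Int × List (List Int) := (3, 3, [[1, 1, 2, 3], [1, 2, 3, 3]])

def Spec_solution (rows : Int) (columns : Int) (queries : List (List Int)) (out : List Int) : Prop := out = solution_alt rows columns queries
instance (rows : Int) (columns : Int) (queries : List (List Int)) (out : List Int) : Decidable (Spec_solution rows columns queries out) := by unfold Spec_solution; infer_instance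

-- ===== CLAIM (what is proved, stated in full; the proofs are below) =====
def Claim_equal_solution : Prop := ∀ (rows : Int) (columns : Int) (queries : List (List Int)), Dom_solution rows columns queries → Pre_solution rows columns queries → Spec_solution rows columns queries (solution rows columns queries)

-- ===== LEMMAS AND PROOFS =====

-- the two query-processing steps, as the ports' fold bodies (definitionally equal to them)
def stepA (st : List (List Int) × List Int) (q : List Int) : List (List Int) × List Int :=
  let q0 := (PySem.List.pyGet? q 0).getD 0
  let q1 := (PySem.List.pyGet? q 1).getD 0
  let q2 := (PySem.List.pyGet? q 2).getD 0
  let q3 := (PySem.List.pyGet? q 3).getD 0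
  let s0 := pyRd st.1 (q0-1) (q1-1)
  let t1 := (PySem.List.pyRange q1 q3 1).foldl (fun (t : List (List Int) × Int × Int) c =>
      let old := pyRd t.1 (q0-1) c
      (pyWr t.1 (q0-1) c t.2.1, old, min t.2.2 old)) (st.1, s0, s0)
  let t2 := (PySem.List.pyRange q0 q2 1).foldl (fun (t : List (List Int) × Int × Int) r =>
      let old := pyRd t.1 r (q3-1)
      (pyWr t.1 r (q3-1) t.2.1, old, min t.2.2 old)) t1
  let t3 := (PySem.List.pyRange (q3-2) (q1-2) (-1)).foldl (fun (t : List (List Int) × Int × Int) c =>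
      let old := pyRd t.1 (q2-1) c
      (pyWr t.1 (q2-1) c t.2.1, old, min t.2.2 old)) t2
  let t4 := (PySem.List.pyRange (q2-2) (q0-2) (-1)).foldl (fun (t : List (List Int) × Int × Int) r =>
      let old := pyRd t.1 r (q1-1)
      (pyWr t.1 r (q1-1) t.2.1, old, min t.2.2 old)) t3
  (t4.1, st.2 ++ [t4.2.2])

def stepB (st : List (List Int) × List Int) (q : List Int) : List (List Int) × List Int :=
  let r1 := (PySem.List.pyGet? q 0).getD 0 - 1
  let c1 := (PySem.List.pyGet? q 1).getD 0 - 1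
  let r2 := (PySem.List.pyGet? q 2).getD 0 - 1
  let c2 := (PySem.List.pyGet? q 3).getD 0 - 1
  let coords : List (Int × Int) :=
    (PySem.List.pyRange c1 (c2+1) 1).map (fun c => (r1, c))
    ++ (PySem.List.pyRange (r1+1) (r2+1) 1).map (fun r => (r, c2))
    ++ (PySem.List.pyRange (c2-1) (c1-1) (-1)).map (fun c => (r2, c))
    ++ (PySem.List.pyRange (r2-1) r1 (-1)).map (fun r => (r, c1))
  let vals := coords.map (fun p => pyRd st.1 p.1 p.2)
  let rotated := [(PySem.List.pyGet? vals (-1)).getD 0] ++ PySem.List.slice vals none (some (-1))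
  let m1 := (coords.zip rotated).foldl (fun acc pv => pyWr acc pv.1.1 pv.1.2 pv.2) st.1
  (m1, st.2 ++ [(PySem.List.min? vals (fun x => x)).getD 0])

def buildA (rows : Int) (columns : Int) : List (List Int) :=
  ((PySem.List.pyRange 0 rows 1).foldl (fun (st : List (List Int) × Int) i =>
      (PySem.List.pyRange 0 columns 1).foldl (fun (st2 : List (List Int) × Int) _j =>
        (PySem.List.pySetD st2.1 i (((PySem.List.pyGet? st2.1 i).getD []) ++ [st2.2]), st2.2 + 1)) st)
    ((PySem.List.pyRange 0 rows 1).map (fun _ => ([] : List Int)), (1 : Int))).1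

def matB (rows : Int) (columns : Int) : List (List Int) :=
  (PySem.List.pyRange 0 rows 1).map (fun r =>
    (PySem.List.pyRange 0 columns 1).map (fun c => r * columns + c + 1))

lemma solution_eq_fold (rows columns : Int) (queries : List (List Int)) :
    solution rows columns queries = (queries.foldl stepA (buildA rows columns, ([] : List Int))).2 := rfl

lemma solution_alt_eq_fold (rows columns : Int) (queries : List (List Int)) :
    solution_alt rows columns queries = (queries.foldl stepB (matB rows columns, ([] : List Int))).2 := rfl


-- Nat-level forms of the read / write helpers (for nonnegative indices)
lemma pyRd_eq (m : List (List Int)) (r c : Int) (hr : 0 ≤ r) (hc : 0 ≤ c) :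
    pyRd m r c = (m.getD r.toNat []).getD c.toNat 0 := by
  simp [pyRd, PySem.List.pyGet?_of_nonneg, hr, hc, List.getD_eq_getElem?_getD]

lemma pyWr_eq (m : List (List Int)) (r c : Int) (v : Int) (hr : 0 ≤ r) (hc : 0 ≤ c) :
    pyWr m r c v = m.set r.toNat ((m.getD r.toNat []).set c.toNat v) := by
  simp [pyWr, PySem.List.pyGet?_of_nonneg, PySem.List.pySetD_of_nonneg, hr, hc,
    List.getD_eq_getElem?_getD]

lemma pyRd_pyWr_ne (m : List (List Int)) (p q : Int × Int) (v : Int)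
    (hp1 : 0 ≤ p.1) (hp2 : 0 ≤ p.2) (hq1 : 0 ≤ q.1) (hq2 : 0 ≤ q.2) (hne : p ≠ q) :
    pyRd (pyWr m p.1 p.2 v) q.1 q.2 = pyRd m q.1 q.2 := by
  rw [pyWr_eq _ _ _ _ hp1 hp2, pyRd_eq _ _ _ hq1 hq2, pyRd_eq _ _ _ hq1 hq2]
  by_cases hrr : p.1 = q.1
  · have hcc : p.2 ≠ q.2 := by
      intro h; exact hne (Prod.ext hrr h)
    have hcc' : p.2.toNat ≠ q.2.toNat := by omega
    rw [← hrr]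
    by_cases him : p.1.toNat < m.length
    · simp [List.getD_eq_getElem?_getD, him, hcc']
    · simp [List.getD_eq_getElem?_getD, him]
  · have hrr' : p.1.toNat ≠ q.1.toNat := by omega
    simp [List.getD_eq_getElem?_getD, hrr']

lemma pyWr_comm (m : List (List Int)) (p q : Int × Int) (v w : Int)
    (hp1 : 0 ≤ p.1) (hp2 : 0 ≤ p.2) (hq1 : 0 ≤ q.1) (hq2 : 0 ≤ q.2) (hne : p ≠ q) :
    pyWr (pyWr m p.1 p.2 v) q.1 q.2 w = pyWr (pyWr m q.1 q.2 w) p.1 p.2 v := by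
  rw [pyWr_eq _ _ _ _ hp1 hp2, pyWr_eq _ _ _ _ hq1 hq2,
      pyWr_eq _ _ _ _ hq1 hq2, pyWr_eq _ _ _ _ hp1 hp2]
  by_cases hrr : p.1 = q.1
  · have hcc : p.2 ≠ q.2 := by
      intro h; exact hne (Prod.ext hrr h)
    have hcc' : p.2.toNat ≠ q.2.toNat := by omega
    rw [← hrr]
    by_cases him : p.1.toNat < m.length
    · simp only [List.getD_eq_getElem?_getD, List.getElem?_set, him, if_pos, Option.getD_some]
      rw [List.set_comm _ _ hcc', List.set_set, List.set_set]
    · have h1 : m.set p.1.toNat ((m[p.1.toNat]?.getD []).set p.2.toNat v) = m :=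
        List.set_eq_of_length_le (by omega)
      have h2 : m.set p.1.toNat ((m[p.1.toNat]?.getD []).set q.2.toNat w) = m :=
        List.set_eq_of_length_le (by omega)
      simp only [List.getD_eq_getElem?_getD]
      simp only [h1, h2]
  · have hrr' : p.1.toNat ≠ q.1.toNat := by omega
    simp only [List.getD_eq_getElem?_getD, List.getElem?_set, if_neg hrr', if_neg (Ne.symm hrr')]
    rw [List.set_comm _ _ hrr']


-- one swap-with-carry step of A at border cell p, and one write-back step of B
def qStep (t : List (List Int) × Int × Int) (p : Int × Int) : List (List Int) × Int × Int :=
  let old := pyRd t.1 p.1 p.2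
  (pyWr t.1 p.1 p.2 t.2.1, old, min t.2.2 old)

def wStep (acc : List (List Int)) (pv : (Int × Int) × Int) : List (List Int) :=
  pyWr acc pv.1.1 pv.1.2 pv.2

def rdm (m : List (List Int)) (p : Int × Int) : Int := pyRd m p.1 p.2

lemma map_rdm_pyWr (ps : List (Int × Int)) (p : Int × Int) (v : Int) (m : List (List Int))
    (hnn : ∀ x ∈ ps, 0 ≤ x.1 ∧ 0 ≤ x.2) (hp1 : 0 ≤ p.1) (hp2 : 0 ≤ p.2) (hnot : p ∉ ps) :
    ps.map (rdm (pyWr m p.1 p.2 v)) = ps.map (rdm m) :=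
  List.map_congr_left (fun x hx =>
    pyRd_pyWr_ne m p x v hp1 hp2 (hnn x hx).1 (hnn x hx).2 (fun h => hnot (h ▸ hx)))

-- A's swap-carry fold over distinct nonnegative coordinates, characterised:
-- matrix = sequential write-back of the carried values, carry = last original value,
-- running minimum = fold of the original values.
lemma swap_spec (ps : List (Int × Int)) : ∀ (m : List (List Int)) (v mn : Int),
    ps.Nodup → (∀ x ∈ ps, 0 ≤ x.1 ∧ 0 ≤ x.2) →
    ps.foldl qStep (m, v, mn) =
      ((ps.zip (v :: (ps.map (rdm m)).dropLast)).foldl wStep m,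
       (ps.map (rdm m)).getLastD v,
       (ps.map (rdm m)).foldl min mn) := by
  induction ps with
  | nil => intro m v mn _ _; simp
  | cons p ps ih =>
    intro m v mn hnd hnn
    have hp := hnn p (List.mem_cons_self ..)
    have hnn' : ∀ x ∈ ps, 0 ≤ x.1 ∧ 0 ≤ x.2 := fun x hx => hnn x (List.mem_cons_of_mem _ hx)
    have hnotin : p ∉ ps := (List.nodup_cons.mp hnd).1
    have hnd' : ps.Nodup := (List.nodup_cons.mp hnd).2
    simp only [List.foldl_cons]
    have hq : qStep (m, v, mn) p = (pyWr m p.1 p.2 v, rdm m p, min mn (rdm m p)) := rfl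
    rw [hq, ih _ _ _ hnd' hnn', map_rdm_pyWr ps p v m hnn' hp.1 hp.2 hnotin]
    cases ps with
    | nil => simp [wStep, rdm]
    | cons p2 ps2 =>
      simp only [List.map_cons, List.dropLast_cons₂, List.zip_cons_cons, List.foldl_cons,
        List.getLastD_cons]
      rfl

lemma writeSeq_snoc (l : List ((Int × Int) × Int)) : ∀ (x : (Int × Int) × Int) (m : List (List Int)),
    (∀ pv ∈ l, pv.1 ≠ x.1) → (∀ pv ∈ l, 0 ≤ pv.1.1 ∧ 0 ≤ pv.1.2) → 0 ≤ x.1.1 → 0 ≤ x.1.2 →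
    (l ++ [x]).foldl wStep m = (x :: l).foldl wStep m := by
  induction l with
  | nil => intro x m _ _ _ _; rfl
  | cons a l ih =>
    intro x m hne hnn hx1 hx2
    have ha := hnn a (List.mem_cons_self ..)
    have hnn' : ∀ pv ∈ l, 0 ≤ pv.1.1 ∧ 0 ≤ pv.1.2 := fun pv h => hnn pv (List.mem_cons_of_mem _ h)
    have hne' : ∀ pv ∈ l, pv.1 ≠ x.1 := fun pv h => hne pv (List.mem_cons_of_mem _ h)
    have hax : a.1 ≠ x.1 := hne a (List.mem_cons_self ..)
    simp only [List.cons_append, List.foldl_cons]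
    rw [ih x (wStep m a) hne' hnn' hx1 hx2]
    simp only [List.foldl_cons]
    have hcomm : wStep (wStep m a) x = wStep (wStep m x) a := by
      simp only [wStep]
      exact pyWr_comm m a.1 x.1 a.2 x.2 ha.1 ha.2 hx1 hx2 hax
    rw [hcomm]

-- Python's min over a nonempty int list is the fold of Int.min
lemma min_go (f : Option Int → Int → Option Int) (hf : ∀ m y, f (some m) y = some (min m y)) :
    ∀ (l : List Int) (x : Int), l.foldl f (some x) = some (l.foldl min x) := by
  intro l
  induction l with
  | nil => intro x; rfl
  | cons a l ih =>
    intro x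
    simp only [List.foldl_cons, hf]
    exact ih (min x a)

lemma min?_int_getD (l : List Int) (x d : Int) :
    (PySem.List.min? (x :: l) (fun y => y)).getD d = l.foldl min x := by
  have h : PySem.List.min? (x :: l) (fun y => y) = some (l.foldl min x) := by
    simp only [PySem.List.min?, List.foldl_cons]
    exact min_go _ (fun m y => by
      by_cases h : y < m <;> simp [h, min_def]) l x
  rw [h]; rfl

lemma foldl_min_le (l : List Int) : ∀ (a : Int), l.foldl min a ≤ a := by
  induction l with
  | nil => intro a; simp
  | cons x l ih => intro a; exact le_trans (ih _) (min_le_left _ _)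

lemma foldl_min_concat (l : List Int) (a : Int) : (l ++ [a]).foldl min a = l.foldl min a := by
  rw [List.foldl_append]
  simp only [List.foldl_cons, List.foldl_nil]
  exact min_eq_left (foldl_min_le l a)


-- the clockwise border of the query rectangle: B's coordinate list is
-- (x1-1, y1-1) :: borderTail, A's traversal order is borderTail ++ [(x1-1, y1-1)]
def borderSeg1 (x1 y1 y2 : Int) : List (Int × Int) :=
  (PySem.List.pyRange y1 y2 1).map (fun c => (x1-1, c))
def borderSeg2 (x2 y2 : Int) (x1 : Int) : List (Int × Int) :=
  (PySem.List.pyRange x1 x2 1).map (fun r => (r, y2-1))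
def borderSeg3 (x2 y1 y2 : Int) : List (Int × Int) :=
  (PySem.List.pyRange (y2-2) (y1-2) (-1)).map (fun c => (x2-1, c))
def borderSeg4B (x1 x2 y1 : Int) : List (Int × Int) :=
  (PySem.List.pyRange (x2-2) (x1-1) (-1)).map (fun r => (r, y1-1))
def borderTail (x1 y1 x2 y2 : Int) : List (Int × Int) :=
  borderSeg1 x1 y1 y2 ++ (borderSeg2 x2 y2 x1 ++ (borderSeg3 x2 y1 y2 ++ borderSeg4B x1 x2 y1))
def borderAll (x1 y1 x2 y2 : Int) : List (Int × Int) :=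
  (x1-1, y1-1) :: borderTail x1 y1 x2 y2

lemma seg4A_split (x1 x2 y1 : Int) (h : x1 < x2) :
    (PySem.List.pyRange (x2-2) (x1-2) (-1)).map (fun r => (r, y1-1))
      = borderSeg4B x1 x2 y1 ++ [(x1-1, y1-1)] := by
  unfold borderSeg4B
  rw [PySem.List.pyRange_neg_one_eq_reverse, PySem.List.pyRange_neg_one_eq_reverse]
  have e1 : x1 - 2 + 1 = x1 - 1 := by ring
  have e2 : x2 - 2 + 1 = x2 - 1 := by ring
  rw [e1, e2]
  rw [PySem.List.pyRange_one_cons (show x1 - 1 < x2 - 1 by omega)]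
  have e3 : x1 - 1 + 1 = x1 := by ring
  rw [e3, List.reverse_cons, List.map_append]
  rfl

lemma mem_seg1 (x1 y1 y2 : Int) (p : Int × Int) :
    p ∈ borderSeg1 x1 y1 y2 ↔ ∃ c, (y1 ≤ c ∧ c < y2) ∧ p = (x1-1, c) := by
  simp [borderSeg1, PySem.List.mem_pyRange_one, eq_comm]

lemma mem_seg2 (x2 y2 x1 : Int) (p : Int × Int) :
    p ∈ borderSeg2 x2 y2 x1 ↔ ∃ r, (x1 ≤ r ∧ r < x2) ∧ p = (r, y2-1) := by
  simp [borderSeg2, PySem.List.mem_pyRange_one, eq_comm]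

lemma mem_seg3 (x2 y1 y2 : Int) (p : Int × Int) :
    p ∈ borderSeg3 x2 y1 y2 ↔ ∃ c, (y1-2 < c ∧ c ≤ y2-2) ∧ p = (x2-1, c) := by
  simp [borderSeg3, PySem.List.mem_pyRange_neg_one, eq_comm]

lemma mem_seg4B (x1 x2 y1 : Int) (p : Int × Int) :
    p ∈ borderSeg4B x1 x2 y1 ↔ ∃ r, (x1-1 < r ∧ r ≤ x2-2) ∧ p = (r, y1-1) := by
  simp [borderSeg4B, PySem.List.mem_pyRange_neg_one, eq_comm]

lemma mem_borderTail (x1 y1 x2 y2 : Int) (p : Int × Int) :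
    p ∈ borderTail x1 y1 x2 y2 ↔
      (∃ c, (y1 ≤ c ∧ c < y2) ∧ p = (x1-1, c))
      ∨ (∃ r, (x1 ≤ r ∧ r < x2) ∧ p = (r, y2-1))
      ∨ (∃ c, (y1-2 < c ∧ c ≤ y2-2) ∧ p = (x2-1, c))
      ∨ (∃ r, (x1-1 < r ∧ r ≤ x2-2) ∧ p = (r, y1-1)) := by
  simp [borderTail, List.mem_append, mem_seg1, mem_seg2, mem_seg3, mem_seg4B]

lemma border_nonneg (x1 y1 x2 y2 : Int) (h1 : 1 ≤ x1) (h3 : 1 ≤ y1)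
    (hx : x1 < x2) (hy : y1 < y2) (p : Int × Int)
    (hp : p ∈ borderAll x1 y1 x2 y2) : 0 ≤ p.1 ∧ 0 ≤ p.2 := by
  rcases List.mem_cons.mp hp with rfl | hp
  · constructor <;> simp <;> omega
  · rcases (mem_borderTail x1 y1 x2 y2 p).mp hp with
      ⟨c, hc, rfl⟩ | ⟨r, hr, rfl⟩ | ⟨c, hc, rfl⟩ | ⟨r, hr, rfl⟩ <;>
      constructor <;> simp <;> omega

lemma inj_pair_right (a : Int) : Function.Injective (fun c : Int => (a, c)) := by
  intro b c h; simpa using h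

lemma inj_pair_left (a : Int) : Function.Injective (fun r : Int => (r, a)) := by
  intro b c h; simpa using h

lemma nodup_pyRange_neg_one (a b : Int) : (PySem.List.pyRange a b (-1)).Nodup := by
  rw [PySem.List.pyRange_neg_one_eq_reverse, List.nodup_reverse]
  exact PySem.List.nodup_pyRange_one _ _

lemma border_nodup (x1 y1 x2 y2 : Int) (hx : x1 < x2) (hy : y1 < y2) :
    (borderAll x1 y1 x2 y2).Nodup := by
  unfold borderAll borderTail
  rw [List.nodup_cons]
  constructor
  · intro hmem
    rcases (mem_borderTail x1 y1 x2 y2 (x1-1, y1-1)).mp hmem with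
      ⟨c, hc, h⟩ | ⟨r, hr, h⟩ | ⟨c, hc, h⟩ | ⟨r, hr, h⟩ <;>
      (simp [Prod.ext_iff] at h; omega)
  · rw [List.nodup_append]
    refine ⟨(PySem.List.nodup_pyRange_one _ _).map (inj_pair_right _), ?_, ?_⟩
    · rw [List.nodup_append]
      refine ⟨(PySem.List.nodup_pyRange_one _ _).map (inj_pair_left _), ?_, ?_⟩
      · rw [List.nodup_append]
        refine ⟨(nodup_pyRange_neg_one _ _).map (inj_pair_right _),
          (nodup_pyRange_neg_one _ _).map (inj_pair_left _), ?_⟩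
        · intro a ha b hb
          obtain ⟨c, hc, rfl⟩ := (mem_seg3 x2 y1 y2 a).mp ha
          obtain ⟨r, hr, rfl⟩ := (mem_seg4B x1 x2 y1 b).mp hb
          simp [Prod.ext_iff]; omega
      · intro a ha b hb
        obtain ⟨r, hr, rfl⟩ := (mem_seg2 x2 y2 x1 a).mp ha
        rcases List.mem_append.mp hb with hb | hb
        · obtain ⟨c, hc, rfl⟩ := (mem_seg3 x2 y1 y2 b).mp hb
          simp [Prod.ext_iff]; omega
        · obtain ⟨r2, hr2, rfl⟩ := (mem_seg4B x1 x2 y1 b).mp hb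
          simp [Prod.ext_iff]; omega
    · intro a ha b hb
      obtain ⟨c, hc, rfl⟩ := (mem_seg1 x1 y1 y2 a).mp ha
      rcases List.mem_append.mp hb with hb | hb
      · obtain ⟨r, hr, rfl⟩ := (mem_seg2 x2 y2 x1 b).mp hb
        simp [Prod.ext_iff]; omega
      rcases List.mem_append.mp hb with hb | hb
      · obtain ⟨c2, hc2, rfl⟩ := (mem_seg3 x2 y1 y2 b).mp hb
        simp [Prod.ext_iff]; omega
      · obtain ⟨r, hr, rfl⟩ := (mem_seg4B x1 x2 y1 b).mp hb
        simp [Prod.ext_iff]; omega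


lemma loop_fold_eq (ps : List Int) (g : Int → Int × Int)
    (f : (List (List Int) × Int × Int) → Int → (List (List Int) × Int × Int))
    (hf : ∀ t e, f t e = qStep t (g e)) (init : List (List Int) × Int × Int) :
    ps.foldl f init = (ps.map g).foldl qStep init := by
  rw [List.foldl_map]
  have hfe : f = fun t e => qStep t (g e) := funext fun t => funext fun e => hf t e
  rw [hfe]

lemma step_eq (st : List (List Int) × List Int) (q : List Int)
    (h1 : 1 ≤ q.getD 0 0) (h2 : q.getD 0 0 < q.getD 2 0)
    (h3 : 1 ≤ q.getD 1 0) (h4 : q.getD 1 0 < q.getD 3 0) :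
    stepA st q = stepB st q := by
  obtain ⟨m, acc⟩ := st
  have e0 : (PySem.List.pyGet? q (0:Int)).getD 0 = q.getD 0 0 := by
    rw [PySem.List.pyGet?_of_nonneg q (by norm_num)]
    simp [List.getD_eq_getElem?_getD]
  have e1 : (PySem.List.pyGet? q (1:Int)).getD 0 = q.getD 1 0 := by
    rw [PySem.List.pyGet?_of_nonneg q (by norm_num)]
    simp [List.getD_eq_getElem?_getD]
  have e2 : (PySem.List.pyGet? q (2:Int)).getD 0 = q.getD 2 0 := by
    rw [PySem.List.pyGet?_of_nonneg q (by norm_num)]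
    simp [List.getD_eq_getElem?_getD]
  have e3 : (PySem.List.pyGet? q (3:Int)).getD 0 = q.getD 3 0 := by
    rw [PySem.List.pyGet?_of_nonneg q (by norm_num)]
    simp [List.getD_eq_getElem?_getD]
  unfold stepA stepB
  simp only [e0, e1, e2, e3]
  set x1 := q.getD 0 0 with hx1
  set y1 := q.getD 1 0 with hy1
  set x2 := q.getD 2 0 with hx2
  set y2 := q.getD 3 0 with hy2
  simp only [show y2 - 1 + 1 = y2 from by omega, show x1 - 1 + 1 = x1 from by omega,
    show x2 - 1 + 1 = x2 from by omega, show y2 - 1 - 1 = y2 - 2 from by omega,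
    show y1 - 1 - 1 = y1 - 2 from by omega, show x2 - 1 - 1 = x2 - 2 from by omega]
  rw [loop_fold_eq (PySem.List.pyRange y1 y2 1) (fun c => (x1-1, c))
    (fun (t : List (List Int) × Int × Int) c =>
      (pyWr t.1 (x1-1) c t.2.1, pyRd t.1 (x1-1) c, min t.2.2 (pyRd t.1 (x1-1) c)))
    (fun t e => rfl)]
  rw [loop_fold_eq (PySem.List.pyRange x1 x2 1) (fun r => (r, y2-1))
    (fun (t : List (List Int) × Int × Int) r =>
      (pyWr t.1 r (y2-1) t.2.1, pyRd t.1 r (y2-1), min t.2.2 (pyRd t.1 r (y2-1))))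
    (fun t e => rfl)]
  rw [loop_fold_eq (PySem.List.pyRange (y2-2) (y1-2) (-1)) (fun c => (x2-1, c))
    (fun (t : List (List Int) × Int × Int) c =>
      (pyWr t.1 (x2-1) c t.2.1, pyRd t.1 (x2-1) c, min t.2.2 (pyRd t.1 (x2-1) c)))
    (fun t e => rfl)]
  rw [loop_fold_eq (PySem.List.pyRange (x2-2) (x1-2) (-1)) (fun r => (r, y1-1))
    (fun (t : List (List Int) × Int × Int) r =>
      (pyWr t.1 r (y1-1) t.2.1, pyRd t.1 r (y1-1), min t.2.2 (pyRd t.1 r (y1-1))))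
    (fun t e => rfl)]
  rw [← List.foldl_append, ← List.foldl_append, ← List.foldl_append]
  rw [seg4A_split x1 x2 y1 (by omega)]
  have hsplit : PySem.List.pyRange (y1-1) y2 1 = (y1-1) :: PySem.List.pyRange y1 y2 1 := by
    rw [PySem.List.pyRange_one_cons (show y1 - 1 < y2 by omega)]
    simp only [show y1 - 1 + 1 = y1 from by omega]
  rw [hsplit]
  simp only [List.map_cons, List.cons_append, List.append_assoc, borderSeg4B]
  have hA : (PySem.List.pyRange y1 y2 1).map (fun c => ((x1-1 : Int), c))
      ++ ((PySem.List.pyRange x1 x2 1).map (fun r => (r, y2-1))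
      ++ ((PySem.List.pyRange (y2-2) (y1-2) (-1)).map (fun c => (x2-1, c))
      ++ ((PySem.List.pyRange (x2-2) (x1-1) (-1)).map (fun r => (r, y1-1)) ++ [(x1-1, y1-1)])))
      = ((PySem.List.pyRange y1 y2 1).map (fun c => ((x1-1 : Int), c))
      ++ ((PySem.List.pyRange x1 x2 1).map (fun r => (r, y2-1))
      ++ ((PySem.List.pyRange (y2-2) (y1-2) (-1)).map (fun c => (x2-1, c))
      ++ (PySem.List.pyRange (x2-2) (x1-1) (-1)).map (fun r => (r, y1-1))))) ++ [(x1-1, y1-1)] := by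
    simp [List.append_assoc]
  rw [hA]
  set S := (PySem.List.pyRange y1 y2 1).map (fun c => ((x1-1 : Int), c))
      ++ ((PySem.List.pyRange x1 x2 1).map (fun r => (r, y2-1))
      ++ ((PySem.List.pyRange (y2-2) (y1-2) (-1)).map (fun c => (x2-1, c))
      ++ (PySem.List.pyRange (x2-2) (x1-1) (-1)).map (fun r => (r, y1-1)))) with hSdef
  have hb2 : borderAll x1 y1 x2 y2 = (x1 - 1, y1 - 1) :: S := rfl
  have hndAll : ((x1 - 1, y1 - 1) :: S).Nodup := hb2 ▸ border_nodup x1 y1 x2 y2 h2 h4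
  have hnnAll : ∀ p ∈ (x1 - 1, y1 - 1) :: S, 0 ≤ p.1 ∧ 0 ≤ p.2 := by
    intro p hp; exact border_nonneg x1 y1 x2 y2 h1 h3 h2 h4 p (hb2 ▸ hp)
  have hp0S : (x1 - 1, y1 - 1) ∉ S := (List.nodup_cons.mp hndAll).1
  have hnnS : ∀ p ∈ S, 0 ≤ p.1 ∧ 0 ≤ p.2 := fun p hp => hnnAll p (List.mem_cons_of_mem _ hp)
  have hndA : (S ++ [(x1 - 1, y1 - 1)]).Nodup :=
    ((List.perm_append_singleton _ _).nodup_iff).mpr hndAll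
  have hnnA : ∀ p ∈ S ++ [(x1 - 1, y1 - 1)], 0 ≤ p.1 ∧ 0 ≤ p.2 := fun p hp =>
    hnnAll p ((List.perm_append_singleton _ _).mem_iff.mp hp)
  have hrdm : (fun p : Int × Int => pyRd m p.1 p.2) = rdm m := rfl
  have hw : (fun (acc : List (List Int)) (pv : (Int × Int) × Int) =>
      pyWr acc pv.1.1 pv.1.2 pv.2) = wStep := rfl
  rw [hrdm, hw]
  rw [swap_spec (S ++ [(x1 - 1, y1 - 1)]) m (pyRd m (x1 - 1) (y1 - 1))
      (pyRd m (x1 - 1) (y1 - 1)) hndA hnnA]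
  simp only [List.map_append, List.map_cons, List.map_nil, List.nil_append]
  have hv : rdm m (x1 - 1, y1 - 1) = pyRd m (x1 - 1) (y1 - 1) := rfl
  rw [hv]
  have hSne : S ≠ [] := by
    rw [hSdef]
    simp [PySem.List.pyRange_one_cons h2]
  have hTne : S.map (rdm m) ≠ [] := by simpa using hSne
  obtain ⟨T', t, hT⟩ := (List.eq_nil_or_concat (S.map (rdm m))).resolve_left hTne
  rw [List.concat_eq_append] at hT
  rw [hT, List.dropLast_concat]
  rw [min?_int_getD (T' ++ [t]) (pyRd m (x1 - 1) (y1 - 1)) 0]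
  rw [foldl_min_concat (T' ++ [t]) (pyRd m (x1 - 1) (y1 - 1))]
  have hcons : pyRd m (x1 - 1) (y1 - 1) :: (T' ++ [t])
      = (pyRd m (x1 - 1) (y1 - 1) :: T') ++ [t] := by simp
  rw [hcons]
  rw [PySem.List.pyGet?_neg_one, List.getLast?_concat, PySem.List.slice_to_neg_one,
    List.dropLast_concat]
  have hlen : S.length = (pyRd m (x1 - 1) (y1 - 1) :: T').length := by
    have hl := congrArg List.length hT
    simp only [List.length_map, List.length_append, List.length_cons, List.length_nil] at hl
    simp [hl]
  rw [List.zip_append hlen]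
  simp only [List.zip_cons_cons, List.zip_nil_right]
  rw [writeSeq_snoc (S.zip (pyRd m (x1 - 1) (y1 - 1) :: T')) ((x1 - 1, y1 - 1), t) m
    (fun pv hpv h => hp0S (by have hm := (List.of_mem_zip hpv).1; rw [h] at hm; exact hm))
    (fun pv hpv => hnnS pv.1 (List.of_mem_zip hpv).1) (by simp; omega) (by simp; omega)]
  simp

-- ===== initial matrix: A's append loops build B's closed-form matrix =====
lemma range_shift (n : Nat) (s : Int) :
    s :: (List.range n).map (fun (j : Nat) => (s+1) + (j:Int))
      = (List.range (n+1)).map (fun (j : Nat) => s + (j:Int)) := by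
  rw [List.range_succ_eq_map]
  simp only [List.map_cons, Nat.cast_zero, add_zero, List.map_map]
  refine congrArg (List.cons s) ?_
  apply List.map_congr_left
  intro a _
  simp only [Function.comp_apply]
  push_cast
  ring

lemma inner_aux (i : Int) (hi : 0 ≤ i) (l : List Int) : ∀ (m : List (List Int)) (s : Int),
    i.toNat < m.length →
    l.foldl (fun (st2 : List (List Int) × Int) _j =>
        (PySem.List.pySetD st2.1 i (((PySem.List.pyGet? st2.1 i).getD []) ++ [st2.2]), st2.2 + 1)) (m, s)
    = (m.set i.toNat (m.getD i.toNat [] ++ (List.range l.length).map (fun (j : Nat) => s + (j:Int))),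
       s + l.length) := by
  induction l with
  | nil =>
    intro m s him
    simp only [List.foldl_nil, List.length_nil, List.range_zero, List.map_nil, List.append_nil,
      Nat.cast_zero, add_zero]
    rw [List.getD_eq_getElem (hn := him), List.set_getElem_self]
  | cons a l ih =>
    intro m s him
    simp only [List.foldl_cons]
    have hbody : (PySem.List.pySetD m i (((PySem.List.pyGet? m i).getD []) ++ [s]), s + 1)
        = (m.set i.toNat (m.getD i.toNat [] ++ [s]), s + 1) := by
      simp [PySem.List.pySetD_of_nonneg, PySem.List.pyGet?_of_nonneg, hi,
        List.getD_eq_getElem?_getD]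
    rw [hbody, ih _ _ (by simpa using him)]
    have hget : (m.set i.toNat (m.getD i.toNat [] ++ [s])).getD i.toNat []
        = m.getD i.toNat [] ++ [s] := by
      simp [List.getD_eq_getElem?_getD, him]
    rw [hget, List.set_set, List.append_assoc]
    have hvals : ([s] ++ (List.range l.length).map (fun (j : Nat) => (s+1) + (j:Int)))
        = (List.range (l.length+1)).map (fun (j : Nat) => s + (j:Int)) := by
      simpa using range_shift l.length s
    rw [hvals]
    simp only [List.length_cons, Prod.mk.injEq]
    refine ⟨by trivial, by push_cast; ring⟩

def rowB (columns : Int) (r : Nat) : List Int :=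
  (PySem.List.pyRange 0 columns 1).map (fun c => (r:Int) * columns + c + 1)

def partialMat (rows columns : Int) (n : Nat) : List (List Int) :=
  (List.range rows.toNat).map (fun r => if r < n then rowB columns r else [])

lemma set_map_range (R : Nat) (f : Nat → List Int) (n : Nat) (v : List Int) :
    ((List.range R).map f).set n v = (List.range R).map (fun r => if r = n then v else f r) := by
  apply List.ext_getElem (by simp)
  intro k h1 h2
  simp only [List.length_map, List.length_range] at h1 h2
  rw [List.getElem_set]
  by_cases hk : n = k
  · subst hk
    simp
  · rw [if_neg hk]
    simp only [List.getElem_map, List.getElem_range]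
    rw [if_neg (fun h => hk (Eq.symm h))]

lemma outer_aux (rows columns : Int) (hc : 0 ≤ columns) : ∀ (n : Nat), (n:Int) ≤ rows →
    (PySem.List.pyRange 0 (n:Int) 1).foldl (fun (st : List (List Int) × Int) i =>
        (PySem.List.pyRange 0 columns 1).foldl (fun (st2 : List (List Int) × Int) _j =>
          (PySem.List.pySetD st2.1 i (((PySem.List.pyGet? st2.1 i).getD []) ++ [st2.2]), st2.2 + 1)) st)
      ((PySem.List.pyRange 0 rows 1).map (fun _ => ([] : List Int)), (1 : Int))
    = (partialMat rows columns n, 1 + (n:Int) * columns) := by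
  intro n
  induction n with
  | zero =>
    intro _
    simp only [Nat.cast_zero]
    rw [PySem.List.pyRange_one_eq_nil (le_refl 0)]
    simp [partialMat, PySem.List.pyRange_one, List.map_map,
      List.map_const', List.length_range, Function.comp_def]
  | succ n ih =>
    intro h
    rw [show ((n+1 : Nat) : Int) = (n : Int) + 1 from by push_cast; ring]
    rw [PySem.List.pyRange_one_succ_right (by positivity)]
    rw [List.foldl_append, ih (by omega)]
    simp only [List.foldl_cons, List.foldl_nil]
    have hlen : ((n : Int)).toNat < (partialMat rows columns n).length := by
      simp [partialMat]
      omega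
    rw [inner_aux (n : Int) (by positivity) (PySem.List.pyRange 0 columns 1)
      (partialMat rows columns n) (1 + (n:Int) * columns) hlen]
    have hn : ((n : Int)).toNat = n := Int.toNat_natCast n
    rw [hn]
    have hnR : n < rows.toNat := by omega
    have hget : (partialMat rows columns n).getD n [] = [] := by
      simp [partialMat, List.getD_eq_getElem?_getD, List.getElem?_map,
        List.getElem?_range hnR]
    rw [hget, List.nil_append]
    have hrow : (List.range (PySem.List.pyRange 0 columns 1).length).map
        (fun (j : Nat) => (1 + (n:Int) * columns) + (j:Int)) = rowB columns n := by
      simp only [List.length_map, List.length_range, rowB, PySem.List.pyRange_one,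
        sub_zero, List.map_map]
      apply List.map_congr_left
      intro a _
      simp only [Function.comp_apply]
      ring
    rw [hrow]
    rw [Prod.mk.injEq]
    constructor
    · unfold partialMat
      rw [set_map_range]
      apply List.map_congr_left
      intro r hr
      by_cases hrn : r = n
      · subst hrn
        simp
      · rw [if_neg hrn]
        have : r < n ↔ r < n + 1 := by omega
        simp [this]
    · simp only [PySem.List.length_pyRange_one, sub_zero]
      rw [Int.toNat_of_nonneg hc]
      ring

lemma build_eq (rows columns : Int) : buildA rows columns = matB rows columns := by
  unfold buildA matB
  rcases le_or_gt columns 0 with hc | hc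
  · rw [PySem.List.pyRange_one_eq_nil hc]
    simp only [List.foldl_nil]
    rw [List.foldl_fixed]
    simp
  · rcases le_or_gt rows 0 with hr | hr
    · rw [PySem.List.pyRange_one_eq_nil hr]
      simp
    · have h1 : ((rows.toNat : Nat) : Int) = rows := Int.toNat_of_nonneg (le_of_lt hr)
      have ho := outer_aux rows columns (le_of_lt hc) rows.toNat (by omega)
      rw [h1] at ho
      rw [ho]
      unfold partialMat
      rw [PySem.List.pyRange_one 0 rows]
      simp only [sub_zero, List.map_map]
      apply List.map_congr_left
      intro r hr2
      have hrR : r < rows.toNat := List.mem_range.mp hr2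
      simp [hrR, rowB, Function.comp, zero_add]

lemma fold_eq (qs : List (List Int)) : ∀ (st : List (List Int) × List Int),
    (∀ q ∈ qs, 1 ≤ q.getD 0 0 ∧ q.getD 0 0 < q.getD 2 0 ∧ 1 ≤ q.getD 1 0 ∧ q.getD 1 0 < q.getD 3 0) →
    qs.foldl stepA st = qs.foldl stepB st := by
  induction qs with
  | nil => intro st _; rfl
  | cons q qs ih =>
    intro st hq
    obtain ⟨hq1, hq2, hq3, hq4⟩ := hq q (List.mem_cons_self ..)
    simp only [List.foldl_cons]
    rw [step_eq st q hq1 hq2 hq3 hq4]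
    exact ih _ (fun q' h => hq q' (List.mem_cons_of_mem _ h))

-- ===== VERDICT (by name: the statement is the Claim_ definition above) =====
theorem solution_spec : Claim_equal_solution := by
  unfold Claim_equal_solution
  intro rows columns queries _ hpre
  unfold Spec_solution
  have hq := hpre
  rw [solution_eq_fold, solution_alt_eq_fold, build_eq]
  rw [fold_eq queries _ (fun q h => ⟨(hq q h).2.1, (hq q h).2.2.1,
    (hq q h).2.2.2.2.1, (hq q h).2.2.2.2.2.1⟩)]
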